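-- pv_equiv track=rewrite | github.com/yujia0223/nHDP_Python | data_dbpedia.py | word_count_func
-- ===== SOURCE A (Python) =====
-- def word_count_func(text):
--     '''
--     Counts words within a string
--
--     Args:
--         text (str): String to which the function is to be applied, string
--
--     Returns:
--         Number of words within a string, integer
--     '''
--     counts = dict()
--     # words = text.split() #when str
--     words = text # when list
--
--     for word in words:
--         if word in counts:
--             counts[word] += 1
--         else:
--             counts[word] = 1
--
--     return counts
-- ===== SOURCE B (Python) =====
-- def word_count_func(text):
--     return {word: text.count(word) for word in dict.fromkeys(text)}
-- ===== Notes on version B (the rewrite author's own statement) =====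
-- stated objective: simpler
-- what changed: Replaces the incremental accumulate-into-dict loop with a one-line dict comprehension over the distinct words in first-occurrence order, recomputing each count by a full scan (text.count).
import Mathlib
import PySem

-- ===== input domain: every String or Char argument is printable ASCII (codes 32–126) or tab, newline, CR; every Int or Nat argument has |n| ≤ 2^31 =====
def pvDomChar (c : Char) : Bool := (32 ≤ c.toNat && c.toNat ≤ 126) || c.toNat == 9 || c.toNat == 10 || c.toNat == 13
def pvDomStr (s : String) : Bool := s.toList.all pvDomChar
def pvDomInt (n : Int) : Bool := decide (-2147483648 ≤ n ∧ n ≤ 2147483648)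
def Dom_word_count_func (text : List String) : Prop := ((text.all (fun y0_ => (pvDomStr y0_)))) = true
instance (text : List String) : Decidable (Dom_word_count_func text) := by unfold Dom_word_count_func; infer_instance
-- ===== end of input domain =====

-- B is a dict comprehension over the distinct words (first-occurrence order), each count recomputed by text.count; not faster, just shorter.

-- ===== PORT A =====
def word_count_func (text : List String) : List (String × Int) :=
  (text.foldl
    (fun counts word =>
      if counts.contains word then counts.modify word 0 (· + 1)
      else counts.insert word 1)
    PySem.Dict.empty).items

-- ===== PORT B =====
def word_count_func_alt (text : List String) : List (String × Int) :=
  ((PySem.List.dedup text).foldl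
    (fun d word => d.insert word ((PySem.List.count text word : Int)))
    PySem.Dict.empty).items

-- ===== PRECONDITION & SPEC =====
def Spec_word_count_func (text : List String) (out : List (String × Int)) : Prop := out = word_count_func_alt text
instance (text : List String) (out : List (String × Int)) : Decidable (Spec_word_count_func text out) := by unfold Spec_word_count_func; infer_instance

-- ===== CLAIM (what is proved, stated in full; the proofs are below) =====
def Claim_equal_word_count_func : Prop := ∀ (text : List String), Dom_word_count_func text → Spec_word_count_func text (word_count_func text)

-- ===== LEMMAS AND PROOFS =====

-- A's loop body is exactly the Counter step: both branches are 'modify word 0 (+1)'.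
theorem wc_step_eq (d : PySem.Dict String Int) (w : String) :
    (if d.contains w then d.modify w 0 (· + 1) else d.insert w 1)
      = d.modify w 0 (· + 1) := by
  by_cases h : d.contains w = true
  · simp [h]
  · simp only [Bool.not_eq_true] at h
    simp [h, PySem.Dict.modify, PySem.Dict.getD_of_not_contains d 0 h]

theorem wc_A_eq (text : List String) :
    word_count_func text = (PySem.Dict.counter text).items := by
  unfold word_count_func
  rw [PySem.Dict.counter_eq_foldl]
  congr 1
  apply PySem.List.foldl_congr_mem
  intro d w _
  exact wc_step_eq d w

theorem wc_B_eq (text : List String) :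
    word_count_func_alt text
      = (PySem.Set.ofList text).map (fun k => (k, (text.count k : Int))) := by
  unfold word_count_func_alt
  rw [PySem.List.dedup_eq_ofList]
  have h := PySem.Dict.items_foldl_insert_fresh (PySem.Set.ofList text)
      (fun w => w) (fun w => (PySem.List.count text w : Int)) PySem.Dict.empty
      (by intro a _; simp [PySem.Dict.contains_empty])
      (by simp)
  simpa [PySem.List.count_eq] using h

-- ===== VERDICT (by name: the statement is the Claim_ definition above) =====
theorem word_count_func_spec : Claim_equal_word_count_func := by
  intro text _
  unfold Spec_word_count_func
  rw [wc_A_eq, wc_B_eq, PySem.Dict.items_counter]
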